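-- pv_equiv track=rewrite | github.com/Zhavi221/atlas-utilization | services/calculations/combinatorics.py | make_objects_combinations_for_category
-- ===== SOURCE A (Python) =====
-- import itertools
-- from typing import Dict, List, Iterator
--
-- def make_objects_combinations_for_category(
--     category: Dict[str, int],
--     min_k: int = 2,
--     max_k: int = 4
-- ) -> Iterator[Dict[str, int]]:
--     """
--     For a given event category, yield combinations where each particle type
--     has between min_k and max_k particles.
--     """
--     object_types = list(category.keys())
--
--     count_ranges = []
--     for obj in object_types:
--         available = category[obj]
--         upper = min(max_k, available)
--         if upper >= min_k:
--             count_ranges.append(range(min_k, upper + 1))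
--         else:
--             count_ranges.append(range(0, 1))
--
--     for counts in itertools.product(*count_ranges):
--         result = {obj: count for obj, count in zip(object_types, counts) if count > 0}
--         if result:
--             yield result
-- ===== SOURCE B (Python) =====
-- def make_objects_combinations_for_category(category, min_k=2, max_k=4):
--     """Lazy divide-and-conquer: combinations for a span of types are the merge of the
--     combinations of its two halves; zero counts are dropped as the pieces are built."""
--     pairs = []
--     for t in category:
--         upper = min(max_k, category[t])
--         pairs.append((t, range(min_k, upper + 1) if upper >= min_k else (0,)))
--
--     def gen(lo, hi):
--         # yields lists of (type, positive count) pairs for types[lo:hi], odometer order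
--         if hi - lo == 1:
--             t, r = pairs[lo]
--             for c in r:
--                 yield [(t, c)] if c > 0 else []
--             return
--         mid = (lo + hi) // 2
--         for left in gen(lo, mid):
--             for right in gen(mid, hi):
--                 yield left + right
--
--     if not pairs:
--         return
--     for items in gen(0, len(pairs)):
--         if items:
--             yield dict(items)
-- ===== Notes on version B (the rewrite author's own statement) =====
-- stated objective: alternative
-- what changed: Replaces itertools.product plus a per-combination dict-comprehension filter with a recursive generator over the type index that builds each positive-count dict incrementally and skips zero counts as it descends.
import Mathlib
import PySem

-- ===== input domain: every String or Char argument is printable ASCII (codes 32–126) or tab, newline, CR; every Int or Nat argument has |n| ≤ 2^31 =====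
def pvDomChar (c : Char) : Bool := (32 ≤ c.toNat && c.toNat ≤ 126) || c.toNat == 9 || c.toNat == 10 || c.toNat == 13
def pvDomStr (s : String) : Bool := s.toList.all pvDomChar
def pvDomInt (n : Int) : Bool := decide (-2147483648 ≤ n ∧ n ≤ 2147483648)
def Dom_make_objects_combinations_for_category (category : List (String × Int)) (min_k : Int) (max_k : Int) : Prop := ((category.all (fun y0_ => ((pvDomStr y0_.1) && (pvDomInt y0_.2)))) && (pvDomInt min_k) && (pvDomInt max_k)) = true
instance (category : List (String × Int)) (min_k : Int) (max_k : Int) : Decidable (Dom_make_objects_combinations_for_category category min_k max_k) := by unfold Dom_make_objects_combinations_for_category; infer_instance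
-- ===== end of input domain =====

-- Header: B replaces itertools.product + per-combination filtering with a lazy divide-and-conquer
-- generator: combinations of a span of types are merges of its halves' combinations, zeros dropped
-- as pieces are built (alternative decomposition, same cost).

-- ===== PORT A =====
-- itertools.product(*rs) over lists, in odometer order (rightmost fastest)
def pvProd : List (List Int) → List (List Int)
  | [] => [[]]
  | r :: rs => r.flatMap (fun c => (pvProd rs).map (c :: ·))

def make_objects_combinations_for_category (category : List (String × Int)) (min_k : Int) (max_k : Int) : List (List (String × Int)) :=
  let d := PySem.Dict.ofList category
  let object_types := d.keys
  let count_ranges := object_types.map (fun obj =>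
    let available := d.getD obj 0
    let upper := min max_k available
    if upper ≥ min_k then PySem.List.pyRange min_k (upper + 1) 1
    else PySem.List.pyRange 0 1 1)
  (pvProd count_ranges).flatMap (fun counts =>
    let result := (object_types.zip counts).filter (fun p => p.2 > 0)
    if result.isEmpty then [] else [result])

-- ===== PORT B =====
-- gen(lo, hi) ported on the sublist pairs[lo:hi] itself: one type's span maps its range,
-- a longer span merges the two halves' results (same halving point: mid - lo = length / 2)
def pvGen : List (String × List Int) → List (List (String × Int))
  | [] => []
  | [p] => p.2.map (fun c => if c > 0 then [(p.1, c)] else [])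
  | p :: q :: rest =>
    let mid := (p :: q :: rest).length / 2
    (pvGen ((p :: q :: rest).take mid)).flatMap (fun left =>
      (pvGen ((p :: q :: rest).drop mid)).map (fun right => left ++ right))
termination_by pairs => pairs.length
decreasing_by
  · simp; omega
  · simp; omega

def make_objects_combinations_for_category_alt (category : List (String × Int)) (min_k : Int) (max_k : Int) : List (List (String × Int)) :=
  let d := PySem.Dict.ofList category
  let pairs := d.keys.map (fun t =>
    let upper := min max_k (d.getD t 0)
    (t, if upper ≥ min_k then PySem.List.pyRange min_k (upper + 1) 1 else [0]))
  if pairs.isEmpty then []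
  else (pvGen pairs).flatMap (fun items => if items.isEmpty then [] else [items])

-- ===== PRECONDITION & SPEC =====
def Spec_make_objects_combinations_for_category (category : List (String × Int)) (min_k : Int) (max_k : Int) (out : List (List (String × Int))) : Prop := out = make_objects_combinations_for_category_alt category min_k max_k
instance (category : List (String × Int)) (min_k : Int) (max_k : Int) (out : List (List (String × Int))) : Decidable (Spec_make_objects_combinations_for_category category min_k max_k out) := by unfold Spec_make_objects_combinations_for_category; infer_instance

-- ===== CLAIM (what is proved, stated in full; the proofs are below) =====
def Claim_equal_make_objects_combinations_for_category : Prop := ∀ (category : List (String × Int)) (min_k : Int) (max_k : Int), Dom_make_objects_combinations_for_category category min_k max_k → Spec_make_objects_combinations_for_category category min_k max_k (make_objects_combinations_for_category category min_k max_k)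

-- ===== LEMMAS AND PROOFS =====
lemma pyRange_zero_one : PySem.List.pyRange 0 1 1 = [0] := by decide

-- A's per-combination body, as a function of the pair list
def pvBody (pairs : List (String × List Int)) : List (List (String × Int)) :=
  (pvProd (pairs.map (·.2))).map (fun counts =>
    ((pairs.map (·.1)).zip counts).filter (fun p => p.2 > 0))

lemma pvProd_append (rs ss : List (List Int)) :
    pvProd (rs ++ ss) = (pvProd rs).flatMap (fun a => (pvProd ss).map (a ++ ·)) := by
  induction rs with
  | nil => simp [pvProd]
  | cons r rs ih =>
    simp only [List.cons_append, pvProd, ih, List.flatMap_assoc, List.flatMap_map]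
    congr 1
    funext c
    simp [List.map_flatMap, Function.comp_def]

lemma length_mem_pvProd {rs : List (List Int)} {a : List Int} (h : a ∈ pvProd rs) :
    a.length = rs.length := by
  induction rs generalizing a with
  | nil =>
    simp [pvProd] at h
    simp [h]
  | cons r rs ih =>
    simp only [pvProd, List.mem_flatMap, List.mem_map] at h
    obtain ⟨c, _, b, hb, rfl⟩ := h
    simp [ih hb]

lemma pvBody_append (u v : List (String × List Int)) :
    pvBody (u ++ v) = (pvBody u).flatMap (fun a => (pvBody v).map (a ++ ·)) := by
  unfold pvBody
  simp only [List.map_append, pvProd_append, List.flatMap_map, List.map_flatMap,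
    List.map_map]
  refine List.flatMap_congr (fun a ha => ?_)
  have hlen : (u.map (·.1)).length = a.length := by
    simpa using (length_mem_pvProd ha).symm
  simp [Function.comp_def, List.zip_append hlen, List.filter_append]

lemma pvGen_eq_pvBody (pairs : List (String × List Int)) (h : pairs ≠ []) :
    pvGen pairs = pvBody pairs := by
  induction pairs using pvGen.induct with
  | case1 => exact absurd rfl h
  | case2 p =>
    simp only [pvGen, pvBody, pvProd, List.map_cons, List.map_nil,
      ← List.map_eq_flatMap, List.map_map]
    refine List.map_congr_left (fun c _ => ?_)
    by_cases h0 : 0 < c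
    · simp [h0]
    · simp [h0]
  | case3 p q rest _mid ihd iht =>
    simp only [pvGen]
    have h1 : ((p :: q :: rest).take ((p :: q :: rest).length / 2)) ≠ [] := by
      simp
    have h2 : ((p :: q :: rest).drop ((p :: q :: rest).length / 2)) ≠ [] := by
      simp; omega
    rw [iht h1, ihd h2, ← pvBody_append, List.take_append_drop]

-- ===== VERDICT (by name: the statement is the Claim_ definition above) =====
theorem make_objects_combinations_for_category_spec : Claim_equal_make_objects_combinations_for_category := by
  intro category min_k max_k _
  unfold Spec_make_objects_combinations_for_category
  unfold make_objects_combinations_for_category make_objects_combinations_for_category_alt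
  simp only [pyRange_zero_one]
  cases hk : (PySem.Dict.ofList category).keys with
  | nil => simp [pvProd]
  | cons k ks =>
    rw [pvGen_eq_pvBody _ (by simp)]
    unfold pvBody
    simp only [Function.comp_def, List.flatMap_map, List.map_map, List.map_id']
    refine List.flatMap_congr (fun a _ => ?_)
    by_cases hE : List.filter (fun p => decide (0 < p.2)) ((k :: ks).zip a) = []
    · simp [hE]
    · simp [hE]
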